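-- pv_equiv track=rewrite | github.com/kaefik/py-my-programming-tasks | tasks/task04/task04.py | is_my_password
-- ===== SOURCE A (Python) =====
-- def is_my_password(pswrd):
--     flag_upper = True # первая буква должна быть заглавной
--     for sim in pswrd:
--         if sim.isalpha():
--             if flag_upper:
--                 if not sim.isupper():
--                     return False
--             else:
--                 if sim.isupper():
--                     return False
--             flag_upper = not flag_upper
--     return True
-- ===== SOURCE B (Python) =====
-- def is_my_password(pswrd):
--     sig = ''.join('U' if c.isupper() else 'L' for c in pswrd if c.isalpha())
--     return sig == ('UL' * len(sig))[:len(sig)]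
-- ===== Notes on version B (the rewrite author's own statement) =====
-- stated objective: alternative
-- what changed: Replaces the stateful scan with early returns by a pattern-matching formulation: project the letters to a case-signature string and compare it wholesale against a repeated upper-lower template truncated to the same length.
import Mathlib
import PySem

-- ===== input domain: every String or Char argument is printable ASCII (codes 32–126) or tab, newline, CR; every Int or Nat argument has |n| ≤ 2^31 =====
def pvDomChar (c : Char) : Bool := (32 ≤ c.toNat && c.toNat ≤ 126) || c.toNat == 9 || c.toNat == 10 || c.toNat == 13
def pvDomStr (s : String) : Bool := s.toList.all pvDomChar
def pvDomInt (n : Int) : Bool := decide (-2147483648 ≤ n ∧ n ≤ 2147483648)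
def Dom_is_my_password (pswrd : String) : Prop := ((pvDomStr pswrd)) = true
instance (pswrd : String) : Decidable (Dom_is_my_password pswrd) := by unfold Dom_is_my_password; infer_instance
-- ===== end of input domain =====

-- B replaces A's stateful early-return scan by a pattern comparison: the letters' case signature ('U'/'L') must equal the 'UL'-repeated template truncated to its length; objective: alternative.


-- ===== PORT A =====
-- loop over the characters with the toggling flag_upper, early return False
def pvLoopA : List Char → Bool → Bool
  | [], _ => true
  | c :: rest, flagUpper =>
    if PySem.Chars.isalpha c then
      if flagUpper then
        if !(PySem.Chars.isupper c) then false
        else pvLoopA rest (!flagUpper)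
      else
        if PySem.Chars.isupper c then false
        else pvLoopA rest (!flagUpper)
    else pvLoopA rest flagUpper

def is_my_password (pswrd : String) : Bool := pvLoopA pswrd.toList true

-- ===== PORT B =====
-- 'UL' * n → List.flatten (List.replicate n ['U','L']) and [:n] → List.take n (hand ports of string repetition and prefix slice; exact on any list)
def is_my_password_alt (pswrd : String) : Bool :=
  let sig := (pswrd.toList.filter (fun c => PySem.Chars.isalpha c)).map
      (fun c => if PySem.Chars.isupper c then 'U' else 'L')
  sig == (List.flatten (List.replicate sig.length ['U', 'L'])).take sig.length

-- ===== PRECONDITION & SPEC =====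
def Spec_is_my_password (pswrd : String) (out : Bool) : Prop := out = is_my_password_alt pswrd
instance (pswrd : String) (out : Bool) : Decidable (Spec_is_my_password pswrd out) := by unfold Spec_is_my_password; infer_instance

-- ===== CLAIM (what is proved, stated in full; the proofs are below) =====
def Claim_equal_is_my_password : Prop := ∀ (pswrd : String), Dom_is_my_password pswrd → Spec_is_my_password pswrd (is_my_password pswrd)

-- ===== LEMMAS AND PROOFS =====

-- the alternating 'U'/'L' pattern of length n starting with phase f (f = true ↦ 'U')
def pvAltPat : Bool → Nat → List Char
  | _, 0 => []
  | f, n + 1 => (if f then 'U' else 'L') :: pvAltPat (!f) n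

theorem pvFlatten_replicate (m : Nat) :
    List.flatten (List.replicate m ['U', 'L']) = pvAltPat true (2 * m) := by
  induction m with
  | zero => rfl
  | succ k ih =>
    have h2 : 2 * (k + 1) = (2 * k) + 1 + 1 := by omega
    rw [h2]
    simp [List.replicate_succ, pvAltPat, ih]

theorem pvTake_altPat (n m : Nat) (f : Bool) :
    (pvAltPat f m).take n = pvAltPat f (min n m) := by
  induction m generalizing n f with
  | zero => simp [pvAltPat]
  | succ k ih =>
    cases n with
    | zero => simp [pvAltPat]
    | succ j =>
      have : min (j + 1) (k + 1) = (min j k) + 1 := by omega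
      simp [pvAltPat, this, ih]

-- A's loop equals the signature-vs-pattern comparison, for any flag phase
theorem pvLoopA_eq_pat (cs : List Char) (f : Bool) :
    pvLoopA cs f =
      ((cs.filter (fun c => PySem.Chars.isalpha c)).map
        (fun c => if PySem.Chars.isupper c then 'U' else 'L') ==
       pvAltPat f (cs.filter (fun c => PySem.Chars.isalpha c)).length) := by
  induction cs generalizing f with
  | nil => rfl
  | cons c rest ih =>
    by_cases ha : PySem.Chars.isalpha c
    · cases f <;> cases hu : PySem.Chars.isupper c <;>
        simp [pvLoopA, pvAltPat, ha, hu, ih]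
    · simp [pvLoopA, ha, ih]

-- ===== VERDICT (by name: the statement is the Claim_ definition above) =====
theorem is_my_password_spec : Claim_equal_is_my_password := by
  intro pswrd _
  show is_my_password pswrd = is_my_password_alt pswrd
  rw [is_my_password, is_my_password_alt]
  simp only [List.length_map, pvFlatten_replicate, pvTake_altPat]
  have hm : ∀ L : Nat, min L (2 * L) = L := fun L => by omega
  rw [pvLoopA_eq_pat, hm]
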